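-- pv_equiv track=rewrite | github.com/PopJoy-geek/CoursePilot | recommendation.py | normalize_course_code
-- ===== SOURCE A (Python) =====
-- def normalize_course_code(code: str) -> str:
--     """Normalize a section code / variant course code into SUBJECT NNN format.
--
--     Examples:
--     - BIOL110-001R -> BIOL 110
--     - compsci-201 -> COMPSCI 201
--     - STATS 102 -> STATS 102
--     """
--     if not code:
--         return ""
--
--     normalized = code.upper().strip()
--     normalized = normalized.split('-')[0]
--     normalized = ''.join(ch for ch in normalized if ch.isalnum() or ch.isspace())
--     normalized = ''.join(normalized.split())
--
--     subject_chars = []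
--     number_chars = []
--     for ch in normalized:
--         if ch.isalpha() and not number_chars:
--             subject_chars.append(ch)
--         elif ch.isdigit():
--             number_chars.append(ch)
--
--     subject = ''.join(subject_chars)
--     number = ''.join(number_chars)
--
--     if subject and number:
--         return f"{subject} {number}"
--     return normalized
-- ===== SOURCE B (Python) =====
-- def normalize_course_code(code: str) -> str:
--     if not code:
--         return ""
--     head = code.upper().strip().split('-')[0]
--     n = ''.join(ch for ch in head if ch.isalnum())
--     first_digit = next((i for i, ch in enumerate(n) if ch.isdigit()), len(n))
--     subject = ''.join(ch for ch in n[:first_digit] if ch.isalpha())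
--     number = ''.join(ch for ch in n if ch.isdigit())
--     if subject and number:
--         return f"{subject} {number}"
--     return n
-- ===== Notes on version B (the rewrite author's own statement) =====
-- stated objective: simpler
-- what changed: Replaces A's filter-then-split-then-join whitespace removal and its flag-driven subject/number accumulator loop by a single isalnum filter plus locate-first-digit and two filtered passes (subject = alpha chars before the first digit, number = all digits).
import Mathlib
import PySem

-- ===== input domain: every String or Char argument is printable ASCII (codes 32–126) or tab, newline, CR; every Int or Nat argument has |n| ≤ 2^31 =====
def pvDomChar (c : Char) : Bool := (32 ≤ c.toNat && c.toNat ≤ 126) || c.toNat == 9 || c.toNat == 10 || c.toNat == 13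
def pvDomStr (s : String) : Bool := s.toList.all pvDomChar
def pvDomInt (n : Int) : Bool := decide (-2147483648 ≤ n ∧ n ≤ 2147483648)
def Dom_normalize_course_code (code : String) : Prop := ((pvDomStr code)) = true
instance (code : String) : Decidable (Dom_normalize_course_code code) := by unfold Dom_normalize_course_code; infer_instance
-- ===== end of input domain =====

-- B replaces A's flag-driven accumulator loop by locating the first digit and building
-- subject/number with two filtered passes (objective: simpler decomposition, same cost).

-- ===== PORT A =====
-- literal transliteration of A; strings handled as their code-point lists (PySem.Chars)
def normalize_course_code (code : String) : String :=
  if code = "" then "" else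
  let n0 := PySem.Chars.strip (PySem.Chars.upper code.toList)
  -- normalized.split('-')[0]; split never returns an empty list, so headD is exact
  let n1 := (PySem.Chars.splitOn n0 ['-']).headD []
  let n2 := n1.filter (fun ch => PySem.Chars.isalnum ch || PySem.Chars.isspace ch)
  let n3 := PySem.Chars.join [] (PySem.Chars.split₀ n2)
  let sn := n3.foldl (fun (acc : List Char × List Char) ch =>
      if PySem.Chars.isalpha ch && acc.2.isEmpty then (acc.1 ++ [ch], acc.2)
      else if PySem.Chars.isdigit ch then (acc.1, acc.2 ++ [ch]) else acc) ([], [])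
  if !sn.1.isEmpty && !sn.2.isEmpty then String.ofList (sn.1 ++ ' ' :: sn.2) else String.ofList n3

-- ===== PORT B =====
def normalize_course_code_alt (code : String) : String :=
  if code = "" then "" else
  let head := (PySem.Chars.splitOn (PySem.Chars.strip (PySem.Chars.upper code.toList)) ['-']).headD []
  let n := head.filter PySem.Chars.isalnum
  -- next((i for i, ch in enumerate(n) if ch.isdigit()), len(n)) = findIdx (length if none)
  let firstDigit := n.findIdx PySem.Chars.isdigit
  let subject := (n.take firstDigit).filter PySem.Chars.isalpha
  let number := n.filter PySem.Chars.isdigit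
  if !subject.isEmpty && !number.isEmpty then String.ofList (subject ++ ' ' :: number) else String.ofList n

-- ===== PRECONDITION & SPEC =====
def Spec_normalize_course_code (code : String) (out : String) : Prop := out = normalize_course_code_alt code
instance (code : String) (out : String) : Decidable (Spec_normalize_course_code code out) := by unfold Spec_normalize_course_code; infer_instance

-- ===== CLAIM (what is proved, stated in full; the proofs are below) =====
def Claim_equal_normalize_course_code : Prop := ∀ (code : String), Dom_normalize_course_code code → Spec_normalize_course_code code (normalize_course_code code)

-- ===== LEMMAS AND PROOFS =====

theorem isspace_of_isalnum (c : Char) (h : PySem.Chars.isalnum c = true) :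
    PySem.Chars.isspace c = false := by
  simp only [PySem.Chars.isalnum, PySem.Chars.isalpha, PySem.Chars.isdigit,
    PySem.Chars.isupper, PySem.Chars.islower, Bool.or_eq_true, Bool.and_eq_true,
    decide_eq_true_eq, Char.le_def, UInt32.le_iff_toNat_le,
    show 'A'.val.toNat = 65 from rfl, show 'Z'.val.toNat = 90 from rfl,
    show 'a'.val.toNat = 97 from rfl, show 'z'.val.toNat = 122 from rfl,
    show '0'.val.toNat = 48 from rfl, show '9'.val.toNat = 57 from rfl] at h
  simp only [PySem.Chars.isspace, Char.toNat, Bool.or_eq_false_iff, Bool.and_eq_false_iff,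
    decide_eq_false_iff_not]
  omega

theorem isdigit_of_isalpha (c : Char) (h : PySem.Chars.isalpha c = true) :
    PySem.Chars.isdigit c = false := by
  simp only [PySem.Chars.isalpha, PySem.Chars.isupper, PySem.Chars.islower,
    Bool.or_eq_true, Bool.and_eq_true, decide_eq_true_eq, Char.le_def,
    UInt32.le_iff_toNat_le,
    show 'A'.val.toNat = 65 from rfl, show 'Z'.val.toNat = 90 from rfl,
    show 'a'.val.toNat = 97 from rfl, show 'z'.val.toNat = 122 from rfl] at h
  simp only [PySem.Chars.isdigit, Bool.and_eq_false_iff, decide_eq_false_iff_not,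
    Char.le_def, UInt32.le_iff_toNat_le,
    show '0'.val.toNat = 48 from rfl, show '9'.val.toNat = 57 from rfl]
  omega

-- flatten of str.split() = the string with its whitespace removed
theorem split₀_go_flatten (s cur : List Char) (acc : List (List Char)) :
    (PySem.Chars.split₀.go s cur acc).flatten
      = acc.reverse.flatten ++ cur.reverse ++ s.filter (fun c => !PySem.Chars.isspace c) := by
  induction s generalizing cur acc with
  | nil =>
      simp only [PySem.Chars.split₀.go]
      by_cases h : cur.isEmpty = true
      · simp_all
      · simp_all
  | cons c rest ih =>
      simp only [PySem.Chars.split₀.go]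
      by_cases hsp : PySem.Chars.isspace c = true
      · by_cases hc : cur.isEmpty = true
        · simp [hsp, ih, List.isEmpty_iff.mp hc]
        · simp [hsp, hc, ih]
      · have hf : PySem.Chars.isspace c = false := by simpa using hsp
        simp [hf, ih]

theorem flatten_intersperse_nil (l : List (List Char)) :
    (List.intersperse ([] : List Char) l).flatten = l.flatten := by
  induction l with
  | nil => simp
  | cons x l ih =>
    cases l with
    | nil => simp
    | cons y m => simp_all [List.intersperse]

theorem join_split₀ (s : List Char) :
    PySem.Chars.join [] (PySem.Chars.split₀ s) = s.filter (fun c => !PySem.Chars.isspace c) := by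
  have h := split₀_go_flatten s [] []
  simpa [PySem.Chars.join, PySem.Chars.split₀, List.intercalate,
    flatten_intersperse_nil] using h

-- the two filter passes collapse to a single isalnum filter
theorem filter_space_alnum (l : List Char) :
    (l.filter (fun ch => PySem.Chars.isalnum ch || PySem.Chars.isspace ch)).filter
        (fun c => !PySem.Chars.isspace c)
      = l.filter PySem.Chars.isalnum := by
  rw [List.filter_filter]
  apply List.filter_congr
  intro c _
  by_cases ha : PySem.Chars.isalnum c = true
  · simp [ha, isspace_of_isalnum c ha]
  · 
    by_cases hs : PySem.Chars.isspace c = true <;> simp_all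

-- A's flag loop, once a digit has been seen (acc.2 nonempty): only digits accumulate
theorem loopA_digits (l : List Char) (s d : List Char) (hd : d ≠ []) :
    l.foldl (fun (acc : List Char × List Char) ch =>
      if PySem.Chars.isalpha ch && acc.2.isEmpty then (acc.1 ++ [ch], acc.2)
      else if PySem.Chars.isdigit ch then (acc.1, acc.2 ++ [ch]) else acc) (s, d)
    = (s, d ++ l.filter PySem.Chars.isdigit) := by
  induction l generalizing d with
  | nil => simp
  | cons c rest ih =>
      have hde : d.isEmpty = false := by simpa [List.isEmpty_iff] using hd
      simp only [List.foldl_cons, hde, Bool.and_false, Bool.false_eq_true, if_false]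
      by_cases hdig : PySem.Chars.isdigit c = true
      · rw [if_pos hdig, ih (d ++ [c]) (by simp)]
        simp [hdig]
      · rw [if_neg hdig, ih d hd]
        simp [hdig]

-- A's flag loop from an empty digit accumulator = B's take/filter formulation
theorem loopA_empty (l : List Char) (s : List Char) :
    l.foldl (fun (acc : List Char × List Char) ch =>
      if PySem.Chars.isalpha ch && acc.2.isEmpty then (acc.1 ++ [ch], acc.2)
      else if PySem.Chars.isdigit ch then (acc.1, acc.2 ++ [ch]) else acc) (s, [])
    = (s ++ (l.take (l.findIdx PySem.Chars.isdigit)).filter PySem.Chars.isalpha,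
       l.filter PySem.Chars.isdigit) := by
  induction l generalizing s with
  | nil => simp
  | cons c rest ih =>
      by_cases hdig : PySem.Chars.isdigit c = true
      · have halpha : PySem.Chars.isalpha c = false := by
          by_cases h : PySem.Chars.isalpha c = true
          · exact absurd hdig (by simp [isdigit_of_isalpha c h])
          · simpa using h
        simp only [List.foldl_cons, halpha, Bool.false_and, Bool.false_eq_true, if_false,
          if_pos hdig, List.nil_append]
        rw [loopA_digits rest s [c] (by simp)]
        simp [List.findIdx_cons, hdig]
      · by_cases halpha : PySem.Chars.isalpha c = true
        · simp only [List.foldl_cons, halpha, List.isEmpty_nil, Bool.and_true, if_true]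
          rw [ih (s ++ [c])]
          simp [List.findIdx_cons, hdig, halpha, List.take_succ_cons]
        · simp only [List.foldl_cons, halpha, Bool.false_and, Bool.false_eq_true, if_false,
            hdig]
          rw [ih s]
          simp [List.findIdx_cons, hdig, halpha, List.take_succ_cons]

-- ===== VERDICT (by name: the statement is the Claim_ definition above) =====
theorem normalize_course_code_spec : Claim_equal_normalize_course_code := by
  intro code _
  unfold Spec_normalize_course_code normalize_course_code normalize_course_code_alt
  by_cases hc : code = ""
  · simp [hc]
  · simp only [hc, if_false]
    rw [join_split₀, filter_space_alnum, loopA_empty]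
    simp only [List.nil_append]
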